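-- pv_equiv track=rewrite | github.com/heyhobeach/codingtest | 모의고사.py | solution
-- ===== SOURCE A (Python) =====
-- def solution(answers):
--     answer = []
--
--     a1=[1,2,3,4,5]
--     a2=[2,1,2,3,2,4,2,5]#8
--     a3=[3,3,1,1,2,2,4,4,5,5]#10
--
--     count =[0,0,0]
--
--
--
--     for i in range(len(answers)):
--         if a1[i%len(a1)]==answers[i%len(answers)]:
--             count[0]+=1
--         if a2[i%len(a2)]==answers[i%len(answers)]:
--             count[1]+=1
--         if a3[i%len(a3)]==answers[i%len(answers)]:
--             count[2]+=1
--
--     return_count=max(count)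
--
--     if return_count==count[0]:
--         answer.append(1)
--     if return_count==count[1]:
--         answer.append(2)
--     if return_count==count[2]:
--         answer.append(3)
--
--
--     return answer
--
--
--     #############################################################################
--
--
--     a=[]
-- ===== SOURCE B (Python) =====
-- def solution(answers):
--     patterns = [[1, 2, 3, 4, 5],
--                 [2, 1, 2, 3, 2, 4, 2, 5],
--                 [3, 3, 1, 1, 2, 2, 4, 4, 5, 5]]
--     # One pass over the answers builds a frequency table keyed by
--     # (position mod 40, answer); 40 = lcm of the three pattern periods.
--     freq = {}
--     for i, a in enumerate(answers):
--         k = (i % 40, a)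
--         freq[k] = freq.get(k, 0) + 1
--     # Each pattern is scored from the 40-entry table alone.
--     counts = [sum(freq.get((r, p[r % len(p)]), 0) for r in range(40))
--               for p in patterns]
--     m = max(counts)
--     return [i + 1 for i, c in enumerate(counts) if c == m]
-- ===== Notes on version B (the rewrite author's own statement) =====
-- stated objective: alternative
-- what changed: Instead of comparing every answer against every pattern, B makes one indexing pass building a frequency table of (position mod 40, answer) pairs (40 = lcm of the pattern periods) and then scores each pattern by 40 table lookups, never rescanning the answers; selection of the best patterns is a max plus a comprehension.
import Mathlib
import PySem

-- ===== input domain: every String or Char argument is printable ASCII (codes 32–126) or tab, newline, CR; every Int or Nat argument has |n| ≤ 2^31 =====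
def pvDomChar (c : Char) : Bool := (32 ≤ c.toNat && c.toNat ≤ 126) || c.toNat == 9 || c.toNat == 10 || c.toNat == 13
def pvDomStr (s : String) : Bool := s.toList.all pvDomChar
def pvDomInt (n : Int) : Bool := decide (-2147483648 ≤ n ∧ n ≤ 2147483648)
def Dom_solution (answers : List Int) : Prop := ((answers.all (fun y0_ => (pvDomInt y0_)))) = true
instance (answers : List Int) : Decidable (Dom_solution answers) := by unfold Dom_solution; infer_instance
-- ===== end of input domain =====

-- B replaces A's per-element three-way comparison loop by one pass building a
-- frequency table of (position mod 40, answer) — 40 = lcm of the pattern periods —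
-- from which each pattern is scored by 40 lookups (alternative algorithm, same O(n) cost).

-- ===== PORT A =====
-- count = [0,0,0] is kept as a triple of counters; every list index in A is in range, so pyGetD's default 0 is never used.
def solution (answers : List Int) : List Int :=
  let answer : List Int := []
  let a1 : List Int := [1, 2, 3, 4, 5]
  let a2 : List Int := [2, 1, 2, 3, 2, 4, 2, 5]
  let a3 : List Int := [3, 3, 1, 1, 2, 2, 4, 4, 5, 5]
  let count : Int × Int × Int :=
    (PySem.List.pyRange 0 (answers.length : Int) 1).foldl
      (fun c i =>
        let c0 := if PySem.List.pyGetD a1 (PySem.Int.mod i (a1.length : Int)) 0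
                     == PySem.List.pyGetD answers (PySem.Int.mod i (answers.length : Int)) 0
                  then c.1 + 1 else c.1
        let c1 := if PySem.List.pyGetD a2 (PySem.Int.mod i (a2.length : Int)) 0
                     == PySem.List.pyGetD answers (PySem.Int.mod i (answers.length : Int)) 0
                  then c.2.1 + 1 else c.2.1
        let c2 := if PySem.List.pyGetD a3 (PySem.Int.mod i (a3.length : Int)) 0
                     == PySem.List.pyGetD answers (PySem.Int.mod i (answers.length : Int)) 0
                  then c.2.2 + 1 else c.2.2
        (c0, c1, c2))
      (0, 0, 0)
  -- max(count) on the 3-element list, Python's left fold of max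
  let return_count : Int := max (max count.1 count.2.1) count.2.2
  let answer := if return_count == count.1 then answer ++ [1] else answer
  let answer := if return_count == count.2.1 then answer ++ [2] else answer
  let answer := if return_count == count.2.2 then answer ++ [3] else answer
  answer

-- ===== PORT B =====
-- freq is the Python dict keyed by (i % 40, a); freq[k] = freq.get(k, 0) + 1 is Dict.modify k 0 (· + 1).
def solution_alt (answers : List Int) : List Int :=
  let patterns : List (List Int) := [[1, 2, 3, 4, 5],
                                     [2, 1, 2, 3, 2, 4, 2, 5],
                                     [3, 3, 1, 1, 2, 2, 4, 4, 5, 5]]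
  let freq : PySem.Dict (Int × Int) Int :=
    (PySem.List.enumerate answers).foldl
      (fun d ia => d.modify (PySem.Int.mod ia.1 40, ia.2) 0 (fun x => x + 1))
      PySem.Dict.empty
  let counts : List Int := patterns.map (fun p =>
    (PySem.List.pyRange 0 40).foldl
      (fun s r => s + freq.getD (r, PySem.List.pyGetD p (PySem.Int.mod r (p.length : Int)) 0) 0) 0)
  -- max(counts): counts always has 3 elements, so max? is never none
  let m : Int := (PySem.List.max? counts (fun x => x)).getD 0
  (PySem.List.enumerate counts).filterMap (fun ic => if ic.2 == m then some (ic.1 + 1) else none)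

-- ===== PRECONDITION & SPEC =====
def Spec_solution (answers : List Int) (out : List Int) : Prop := out = solution_alt answers
instance (answers : List Int) (out : List Int) : Decidable (Spec_solution answers out) := by unfold Spec_solution; infer_instance

-- ===== CLAIM (what is proved, stated in full; the proofs are below) =====
def Claim_equal_solution : Prop := ∀ (answers : List Int), Dom_solution answers → Spec_solution answers (solution answers)

-- ===== LEMMAS AND PROOFS =====

theorem pv_mod_eq_self (i n : Int) (h0 : 0 ≤ i) (h1 : i < n) : PySem.Int.mod i n = i := by
  have hn : 0 < n := lt_of_le_of_lt h0 h1
  simp [PySem.Int.mod]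
  rw [Int.fmod_eq_emod]
  split_ifs with h
  · simp only [add_zero]
    exact Int.emod_eq_of_lt h0 h1
  · exact absurd (Or.inl (le_of_lt hn)) h

theorem pv_mod_emod (a n : Int) (hn : 0 < n) : PySem.Int.mod a n = a % n := by
  simp [PySem.Int.mod]
  rw [Int.fmod_eq_emod]
  split_ifs with h
  · simp
  · exact absurd (Or.inl hn.le) h

theorem pv_mod_bounds (a : Int) : 0 ≤ PySem.Int.mod a 40 ∧ PySem.Int.mod a 40 < 40 := by
  rw [pv_mod_emod a 40 (by norm_num)]
  exact ⟨Int.emod_nonneg a (by norm_num), Int.emod_lt_of_pos a (by norm_num)⟩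

theorem pv_mod_mod (a n : Int) (hn : 0 < n) (hd : n ∣ 40) :
    PySem.Int.mod (PySem.Int.mod a 40) n = PySem.Int.mod a n := by
  rw [pv_mod_emod a 40 (by norm_num), pv_mod_emod _ n hn, pv_mod_emod a n hn]
  exact Int.emod_emod_of_dvd a hd

theorem pv_trip {α : Type} (f1 f2 f3 : α → Bool) (l : List α) (c0 c1 c2 : Int) :
    l.foldl (fun c ia =>
      ((if f1 ia then c.1 + 1 else c.1 : Int),
       (if f2 ia then c.2.1 + 1 else c.2.1 : Int),
       (if f3 ia then c.2.2 + 1 else c.2.2 : Int))) (c0, c1, c2)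
    = (c0 + (l.countP f1 : Int), c1 + (l.countP f2 : Int), c2 + (l.countP f3 : Int)) := by
  induction l generalizing c0 c1 c2 with
  | nil => simp
  | cons x t ih =>
      simp only [List.foldl_cons, List.countP_cons, ih]
      split_ifs <;> simp [Prod.ext_iff] <;> omega

theorem pv_trip0 {α : Type} (f1 f2 f3 : α → Bool) (l : List α) :
    l.foldl (fun c ia =>
      ((if f1 ia then c.1 + 1 else c.1 : Int),
       (if f2 ia then c.2.1 + 1 else c.2.1 : Int),
       (if f3 ia then c.2.2 + 1 else c.2.2 : Int))) (0, 0, 0)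
    = ((l.countP f1 : Int), (l.countP f2 : Int), (l.countP f3 : Int)) := by
  simpa using pv_trip f1 f2 f3 l 0 0 0

theorem pv_beq_swap (answers p : List Int) (j m : Int) :
    (PySem.List.pyGetD p m 0 == PySem.List.pyGetD answers j 0)
      = (PySem.List.pyGetD answers j 0 == PySem.List.pyGetD p m 0) := by
  apply Bool.eq_iff_iff.mpr
  simp only [beq_iff_eq]
  exact ⟨fun e => e.symm, fun e => e.symm⟩

theorem pv_countP_mod (answers p : List Int) (c : Int) :
    (PySem.List.pyRange 0 (answers.length : Int)).countP
      (fun i => PySem.List.pyGetD answers (PySem.Int.mod i (answers.length : Int)) 0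
                  == PySem.List.pyGetD p (PySem.Int.mod i c) 0)
    = (PySem.List.pyRange 0 (answers.length : Int)).countP
      (fun i => PySem.List.pyGetD answers i 0 == PySem.List.pyGetD p (PySem.Int.mod i c) 0) := by
  apply List.countP_congr
  intro i hi
  rw [PySem.List.mem_pyRange_one] at hi
  rw [pv_mod_eq_self i _ hi.1 hi.2]

theorem pv_sum_map_add {α : Type} (l : List α) (g h : α → Int) :
    (l.map (fun x => g x + h x)).sum = (l.map g).sum + (l.map h).sum := by
  induction l with
  | nil => simp
  | cons x t ih => simp [ih]; ring

theorem pv_sum_ite {α : Type} (P : α → Bool) (l : List α) :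
    (l.map (fun x => if P x then (1 : Int) else 0)).sum = (l.countP P : Int) := by
  induction l with
  | nil => simp
  | cons x t ih =>
      simp only [List.map_cons, List.sum_cons, List.countP_cons, ih]
      split_ifs <;> push_cast <;> ring

theorem pv_indicator (f : Int → Int) (x : Int × Int) (h0 : 0 ≤ x.1) (h40 : x.1 < 40) :
    ((PySem.List.pyRange 0 40).map (fun r => if x == (r, f r) then (1 : Int) else 0)).sum
      = if x.2 == f x.1 then 1 else 0 := by
  rw [pv_sum_ite]
  have hmem : x.1 ∈ PySem.List.pyRange 0 40 := PySem.List.mem_pyRange_one.mpr ⟨h0, h40⟩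
  have hnd : (PySem.List.pyRange 0 40).Nodup := by decide
  by_cases h : x.2 = f x.1
  · have hc : (PySem.List.pyRange 0 40).countP (fun r => x == (r, f r))
        = (PySem.List.pyRange 0 40).countP (fun r => r == x.1) := by
      apply List.countP_congr
      intro r _
      simp only [beq_iff_eq, Prod.ext_iff]
      constructor
      · rintro ⟨h1, _⟩; exact h1.symm
      · rintro rfl; exact ⟨rfl, h⟩
    have h1 : (PySem.List.pyRange 0 40).countP (fun r => r == x.1) = 1 :=
      List.count_eq_one_of_mem hnd hmem
    rw [hc, h1]
    simp [h]
  · have hc : (PySem.List.pyRange 0 40).countP (fun r => x == (r, f r)) = 0 := by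
      apply List.countP_eq_zero.mpr
      intro r _
      simp only [beq_iff_eq, Prod.ext_iff, not_and]
      rintro rfl
      exact fun hx2 => h hx2
    rw [hc]
    simp [h]

theorem pv_sum_count (f : Int → Int) (l : List (Int × Int))
    (h : ∀ x ∈ l, 0 ≤ x.1 ∧ x.1 < 40) :
    ((PySem.List.pyRange 0 40).map (fun r => (l.count (r, f r) : Int))).sum
      = (l.countP (fun x => x.2 == f x.1) : Int) := by
  induction l with
  | nil => simp
  | cons x t ih =>
      have hx := h x (List.mem_cons_self)
      have ht := ih (fun y hy => h y (List.mem_cons_of_mem _ hy))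
      simp only [List.count_cons, List.countP_cons, Nat.cast_add, Nat.cast_ite,
        Nat.cast_one, Nat.cast_zero]
      rw [pv_sum_map_add, ht, pv_indicator f x hx.1 hx.2]

theorem pv_table (f : Int → Int) (l : List (Int × Int))
    (h : ∀ x ∈ l, 0 ≤ x.1 ∧ x.1 < 40) :
    (PySem.List.pyRange 0 40).foldl (fun s r => s + (l.count (r, f r) : Int)) 0
      = (l.countP (fun x => x.2 == f x.1) : Int) := by
  rw [PySem.List.foldl_add, pv_sum_count f l h]
  ring

theorem pv_getD_freq (answers : List Int) (k : Int × Int) :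
    ((PySem.List.enumerate answers).foldl
        (fun d ia => d.modify (PySem.Int.mod ia.1 40, ia.2) 0 (fun x => x + 1))
        PySem.Dict.empty).getD k 0
      = (((PySem.List.enumerate answers).map (fun ia => (PySem.Int.mod ia.1 40, ia.2))).count k : Int) := by
  rw [← List.foldl_map (f := fun ia : Int × Int => (PySem.Int.mod ia.1 40, ia.2))
        (g := fun d k => PySem.Dict.modify d k 0 (fun x => x + 1))]
  rw [PySem.Dict.getD_foldl_modify_add_one]
  simp [PySem.Dict.getD, PySem.Dict.get?, PySem.Dict.empty]

theorem pv_score (answers p : List Int) (hn : 0 < (p.length : Int)) (hd : (p.length : Int) ∣ 40) :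
    (PySem.List.pyRange 0 40).foldl
      (fun s r => s + (((PySem.List.enumerate answers).map (fun ia => (PySem.Int.mod ia.1 40, ia.2))).count
          (r, PySem.List.pyGetD p (PySem.Int.mod r (p.length : Int)) 0) : Int)) 0
    = ((PySem.List.pyRange 0 (answers.length : Int)).countP
        (fun i => PySem.List.pyGetD answers i 0 == PySem.List.pyGetD p (PySem.Int.mod i (p.length : Int)) 0) : Int) := by
  have hb : ∀ x ∈ (PySem.List.enumerate answers).map (fun ia : Int × Int => (PySem.Int.mod ia.1 40, ia.2)),
      0 ≤ x.1 ∧ x.1 < 40 := by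
    intro x hx
    obtain ⟨ia, _, rfl⟩ := List.mem_map.mp hx
    exact pv_mod_bounds ia.1
  rw [pv_table (fun r => PySem.List.pyGetD p (PySem.Int.mod r (p.length : Int)) 0) _ hb]
  rw [PySem.List.enumerate_eq_map_pyRange answers 0]
  simp only [List.map_map, List.countP_map, Function.comp_def, PySem.List.len_eq]
  have hm : ∀ j : Int, PySem.Int.mod (PySem.Int.mod j 40) (p.length : Int) = PySem.Int.mod j (p.length : Int) :=
    fun j => pv_mod_mod j _ hn hd
  simp only [hm]

theorem pv_select (k1 k2 k3 : Int) :
    (if max (max k1 k2) k3 == k3 then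
       (if max (max k1 k2) k3 == k2 then
          (if max (max k1 k2) k3 == k1 then ([] : List Int) ++ [1] else []) ++ [2]
        else (if max (max k1 k2) k3 == k1 then ([] : List Int) ++ [1] else [])) ++ [3]
     else (if max (max k1 k2) k3 == k2 then
             (if max (max k1 k2) k3 == k1 then ([] : List Int) ++ [1] else []) ++ [2]
           else (if max (max k1 k2) k3 == k1 then ([] : List Int) ++ [1] else [])))
    = (PySem.List.enumerate [k1, k2, k3]).filterMap
        (fun x => if x.2 == (PySem.List.max? [k1, k2, k3] (fun x => x)).getD 0 then some (x.1 + 1) else none) := by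
  simp only [PySem.List.enumerate_cons, PySem.List.enumerate_nil]
  simp only [List.filterMap_cons, List.filterMap_nil]
  simp only [PySem.List.max?_id_cons, List.foldl, Option.getD_some]
  simp only [beq_iff_eq]
  norm_num
  simp only [eq_comm]
  split_ifs <;> rfl

theorem solution_spec_aux : ∀ (answers : List Int), solution answers = solution_alt answers := by
  intro answers
  unfold solution solution_alt
  simp only [pv_trip0, List.map_cons, List.map_nil, pv_getD_freq]
  rw [pv_score answers [1, 2, 3, 4, 5] (by decide) (by decide),
      pv_score answers [2, 1, 2, 3, 2, 4, 2, 5] (by decide) (by decide),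
      pv_score answers [3, 3, 1, 1, 2, 2, 4, 4, 5, 5] (by decide) (by decide)]
  simp only [pv_countP_mod, pv_beq_swap]
  exact pv_select _ _ _

-- ===== VERDICT (by name: the statement is the Claim_ definition above) =====
theorem solution_spec : Claim_equal_solution := by
  intro answers _
  unfold Spec_solution
  exact solution_spec_aux answers
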